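-- pv_equiv track=rewrite | github.com/huyeet/Learn_Using_Git | Advent_Of_Code/testing.py | intersect_blyat
-- ===== SOURCE A (Python) =====
-- def intersect_blyat(letter: str, list_answers: list, index: int, main_list: list):
--     if len(main_list) > 1:
--         if letter in list_answers:
--             if index < len(main_list) - 1:
--                 return intersect_blyat(letter, main_list[index + 1], index + 1, main_list)
--             elif index == len(main_list) - 1:
--                 return 1
--         elif letter not in list_answers:
--             return
--     elif len(main_list) == 1:
--         return len(list_answers)
-- ===== SOURCE B (Python) =====
-- def intersect_blyat(letter: str, list_answers: list, index: int, main_list: list):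
--     n = len(main_list)
--     if n == 0:
--         return None
--     if n == 1:
--         return len(list_answers)
--     current, i = list_answers, index
--     while True:
--         if letter not in current:
--             return None
--         if i == n - 1:
--             return 1
--         if i > n - 1:
--             return None
--         i += 1
--         current = main_list[i]
-- ===== Notes on version B (the rewrite author's own statement) =====
-- stated objective: simpler
-- what changed: Replaces the recursion (which re-tests len(main_list)>1 and re-dispatches on every level) with explicit base cases followed by a flat iterative loop that keeps only the current group and index.
import Mathlib
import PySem

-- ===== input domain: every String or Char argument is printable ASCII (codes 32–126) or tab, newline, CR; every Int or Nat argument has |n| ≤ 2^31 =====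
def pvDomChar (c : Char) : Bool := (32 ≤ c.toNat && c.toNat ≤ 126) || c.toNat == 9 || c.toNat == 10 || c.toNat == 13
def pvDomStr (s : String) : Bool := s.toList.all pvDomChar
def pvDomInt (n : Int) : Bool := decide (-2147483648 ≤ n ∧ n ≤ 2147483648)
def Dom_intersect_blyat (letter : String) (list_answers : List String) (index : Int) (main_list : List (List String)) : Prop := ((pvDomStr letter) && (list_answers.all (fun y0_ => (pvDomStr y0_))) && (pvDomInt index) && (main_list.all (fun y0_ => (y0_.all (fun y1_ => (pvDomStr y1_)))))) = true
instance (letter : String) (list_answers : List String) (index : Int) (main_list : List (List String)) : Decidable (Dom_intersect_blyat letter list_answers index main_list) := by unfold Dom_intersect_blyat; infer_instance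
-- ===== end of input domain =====

-- B replaces A's recursion by explicit base cases plus a flat loop over the current group and index (objective: simpler).

-- ===== PORT A =====
-- literal transliteration of A's recursion; pyGet?'s none branch is Python's IndexError, excluded by Pre_
def intersect_blyat (letter : String) (list_answers : List String) (index : Int) (main_list : List (List String)) : Option Int :=
  if (main_list.length : Int) > 1 then
    if letter ∈ list_answers then
      if index < (main_list.length : Int) - 1 then
        match PySem.List.pyGet? main_list (index + 1) with
        | some l => intersect_blyat letter l (index + 1) main_list
        | none => none   -- IndexError (outside Pre_)
      else if index = (main_list.length : Int) - 1 then some 1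
      else none
    else none
  else if (main_list.length : Int) = 1 then some (list_answers.length : Int)
  else none
termination_by ((main_list.length : Int) - index).toNat
decreasing_by omega

-- ===== PORT B =====
-- the while-True loop of Source B; pyGet?'s none branch is Python's IndexError, excluded by Pre_
def intersect_blyat_altLoop (letter : String) (current : List String) (i : Int) (n : Int) (main_list : List (List String)) : Option Int :=
  if letter ∉ current then none
  else if i = n - 1 then some 1
  else if i > n - 1 then none
  else
    match PySem.List.pyGet? main_list (i + 1) with
    | some l => intersect_blyat_altLoop letter l (i + 1) n main_list
    | none => none   -- IndexError (outside Pre_)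
termination_by (n - i).toNat
decreasing_by omega

def intersect_blyat_alt (letter : String) (list_answers : List String) (index : Int) (main_list : List (List String)) : Option Int :=
  let n : Int := main_list.length
  if n = 0 then none
  else if n = 1 then some (list_answers.length : Int)
  else intersect_blyat_altLoop letter list_answers index n main_list

-- ===== PRECONDITION & SPEC =====
-- Pre_ excludes exactly the inputs where Python A raises IndexError: more than one group,
-- the letter present in the passed group, and index+1 below -len(main_list).
def Pre_intersect_blyat (letter : String) (list_answers : List String) (index : Int) (main_list : List (List String)) : Prop :=
  ¬((main_list.length : Int) > 1 ∧ letter ∈ list_answers ∧ index + 1 < -(main_list.length : Int))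
instance (letter : String) (list_answers : List String) (index : Int) (main_list : List (List String)) : Decidable (Pre_intersect_blyat letter list_answers index main_list) := by unfold Pre_intersect_blyat; infer_instance

def pvWitness_intersect_blyat : String × List String × Int × List (List String) :=
  ("a", ["a", "b"], 0, [["a", "b"], ["a"], ["c", "a"]])

def Spec_intersect_blyat (letter : String) (list_answers : List String) (index : Int) (main_list : List (List String)) (out : Option Int) : Prop := out = intersect_blyat_alt letter list_answers index main_list
instance (letter : String) (list_answers : List String) (index : Int) (main_list : List (List String)) (out : Option Int) : Decidable (Spec_intersect_blyat letter list_answers index main_list out) := by unfold Spec_intersect_blyat; infer_instance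

-- ===== CLAIM (what is proved, stated in full; the proofs are below) =====
def Claim_equal_intersect_blyat : Prop := ∀ (letter : String) (list_answers : List String) (index : Int) (main_list : List (List String)), Dom_intersect_blyat letter list_answers index main_list → Pre_intersect_blyat letter list_answers index main_list → Spec_intersect_blyat letter list_answers index main_list (intersect_blyat letter list_answers index main_list)

-- ===== LEMMAS AND PROOFS =====
theorem intersect_blyat_witness_ok :
    Dom_intersect_blyat (pvWitness_intersect_blyat.1) (pvWitness_intersect_blyat.2.1) (pvWitness_intersect_blyat.2.2.1) (pvWitness_intersect_blyat.2.2.2) ∧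
    Pre_intersect_blyat (pvWitness_intersect_blyat.1) (pvWitness_intersect_blyat.2.1) (pvWitness_intersect_blyat.2.2.1) (pvWitness_intersect_blyat.2.2.2) := by
  decide

-- On the > 1 branch, A's recursion coincides with B's loop as long as the index stays ≥ -len - 1.
theorem intersect_blyat_loop_eq (letter : String) (main_list : List (List String))
    (current : List String) (i : Int)
    (hlen : (main_list.length : Int) > 1) (hi : -(main_list.length : Int) ≤ i + 1) :
    intersect_blyat letter current i main_list =
      intersect_blyat_altLoop letter current i (main_list.length : Int) main_list := by
  rw [intersect_blyat, intersect_blyat_altLoop]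
  by_cases hmem : letter ∈ current
  · simp only [hlen, if_pos, hmem]
    by_cases heq : i = (main_list.length : Int) - 1
    · simp [heq]
    · by_cases hlt : i < (main_list.length : Int) - 1
      · have hget : PySem.List.pyGet? main_list (i + 1) ≠ none := by
          intro h
          rw [PySem.List.pyGet?_eq_none_iff] at h
          exact h ⟨by omega, by omega⟩
        cases hg : PySem.List.pyGet? main_list (i + 1) with
        | none => exact absurd hg hget
        | some l =>
          simp only [hlt, if_pos, heq, if_false, show ¬ i > (main_list.length : Int) - 1 by omega, if_false]
          exact intersect_blyat_loop_eq letter main_list l (i + 1) hlen (by omega)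
      · simp [hlt, heq, show i > (main_list.length : Int) - 1 by omega]
  · simp [hmem, hlen]
termination_by ((main_list.length : Int) - i).toNat
decreasing_by omega

-- ===== VERDICT (by name: the statement is the Claim_ definition above) =====
theorem intersect_blyat_spec : Claim_equal_intersect_blyat := by
  intro letter list_answers index main_list _hDom hPre
  unfold Spec_intersect_blyat intersect_blyat_alt
  by_cases hlen : (main_list.length : Int) > 1
  · simp only [show ¬ ((main_list.length : Int) = 0) by omega, if_false,
      show ¬ ((main_list.length : Int) = 1) by omega, if_false]
    by_cases hmem : letter ∈ list_answers
    · have hi : -(main_list.length : Int) ≤ index + 1 := by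
        unfold Pre_intersect_blyat at hPre
        by_contra hc
        exact hPre ⟨hlen, hmem, by omega⟩
      exact intersect_blyat_loop_eq letter main_list list_answers index hlen hi
    · rw [intersect_blyat, intersect_blyat_altLoop]
      simp [hmem, hlen]
  · rw [intersect_blyat]
    simp only [hlen, if_false]
    by_cases h1 : (main_list.length : Int) = 1
    · simp [h1]
    · have h0 : (main_list.length : Int) = 0 := by omega
      simp [h0]
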